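-- pv_equiv track=rewrite | github.com/pblaszak/Math | monotone.py | generate_v_dict
-- ===== SOURCE A (Python) =====
-- import string
--
-- labels = list(string.ascii_uppercase)
--
-- def generate_dict(coords):
--   dict_of_points = {}
--   for i, (x, y) in enumerate(coords[:-1]):
--     dict_of_points[labels[i]] = (x, y)
--   return dict_of_points
--
-- def generate_v_dict(coords):
--   dict_of_v = {
--   # 'F': 1
--   # 'G': 2
--  }
--   points = generate_dict(coords)
--   max_x_key = max(points, key=lambda k: points[k])
--   sorted_keys = sorted(points.keys())
--   start_index = sorted_keys.index(max_x_key)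
--   new_order = sorted_keys[start_index:] + sorted_keys[:start_index]
--   for i, key in enumerate(new_order):
--     dict_of_v[key]= i+1
--   return dict_of_v
-- ===== SOURCE B (Python) =====
-- import string
--
-- def generate_v_dict(coords):
--   pts = coords[:-1]
--   n = len(pts)
--   start = max(range(n), key=lambda i: pts[i])
--   return {string.ascii_uppercase[(start + p) % n]: p + 1 for p in range(n)}
-- ===== Notes on version B (the rewrite author's own statement) =====
-- stated objective: simpler
-- what changed: B drops the intermediate dict, the sorted key list, the .index scan and the slice-and-concatenate rotation: it finds the argmax index of coords[:-1] directly and emits each (label, rank) pair by modular index arithmetic in one comprehension.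
import Mathlib
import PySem

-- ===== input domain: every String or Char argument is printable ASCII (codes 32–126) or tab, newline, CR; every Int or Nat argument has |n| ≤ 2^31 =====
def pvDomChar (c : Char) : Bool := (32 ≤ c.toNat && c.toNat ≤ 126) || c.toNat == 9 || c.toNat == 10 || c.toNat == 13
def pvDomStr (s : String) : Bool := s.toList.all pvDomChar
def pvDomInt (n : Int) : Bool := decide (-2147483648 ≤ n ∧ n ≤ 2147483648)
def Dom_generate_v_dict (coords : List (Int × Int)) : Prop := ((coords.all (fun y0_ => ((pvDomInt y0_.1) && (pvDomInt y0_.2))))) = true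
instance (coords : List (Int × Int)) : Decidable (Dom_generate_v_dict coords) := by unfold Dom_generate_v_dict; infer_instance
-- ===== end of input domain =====

-- B replaces A's dict-of-points / sorted-keys / .index / slice-rotation pipeline by a single
-- argmax over the point list plus modular index arithmetic for each rank (objective: simpler).


-- ===== PORT A =====
-- labels = list(string.ascii_uppercase)
def pyLabels : List String :=
  ["A","B","C","D","E","F","G","H","I","J","K","L","M","N","O","P","Q","R","S","T","U","V","W","X","Y","Z"]

-- labels[i] raises IndexError for i ≥ 26; Pre_ keeps i < 26, where pyGetD is exact
def generate_dict (coords : List (Int × Int)) : PySem.Dict String (Int × Int) :=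
  (PySem.List.enumerate (PySem.List.slice coords none (some (-1)))).foldl
    (fun d p => d.insert (PySem.List.pyGetD pyLabels p.1 "") p.2) PySem.Dict.empty

-- max() over an empty dict raises ValueError and .index a ValueError on a missing key;
-- Pre_ guarantees a nonempty dict, where the .getD defaults are never taken and the
-- lambda's points[k] lookup (getD) always hits an existing key.
def generate_v_dict (coords : List (Int × Int)) : List (String × Int) :=
  let points := generate_dict coords
  let max_x_key := (PySem.List.max2? points.keys
      (fun k => (points.getD k (0, 0)).1) (fun k => (points.getD k (0, 0)).2)).getD ""
  let sorted_keys := PySem.List.sorted points.keys (fun x => x) false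
  let start_index : Nat := (PySem.List.index? sorted_keys max_x_key).getD 0
  let new_order := PySem.List.slice sorted_keys (some (start_index : Int)) none ++
      PySem.List.slice sorted_keys none (some (start_index : Int))
  ((PySem.List.enumerate new_order).foldl
    (fun d p => d.insert p.2 (p.1 + 1)) (PySem.Dict.empty : PySem.Dict String Int)).items

-- ===== PORT B =====
-- max(range(n), key=...) raises ValueError for n = 0 and ascii_uppercase[...] IndexError for
-- n > 26; Pre_ excludes both, where the .getD defaults below are never taken.
def generate_v_dict_alt (coords : List (Int × Int)) : List (String × Int) :=
  let pts := PySem.List.slice coords none (some (-1))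
  let n := PySem.List.len pts
  let start := (PySem.List.max2? (PySem.List.pyRange 0 n 1)
      (fun i => (PySem.List.pyGetD pts i (0, 0)).1)
      (fun i => (PySem.List.pyGetD pts i (0, 0)).2)).getD 0
  ((PySem.List.pyRange 0 n 1).foldl
    (fun d p => d.insert (PySem.List.pyGetD pyLabels (PySem.Int.mod (start + p) n) "") (p + 1))
    (PySem.Dict.empty : PySem.Dict String Int)).items

-- ===== PRECONDITION & SPEC =====
-- Pre_ excludes exactly the crashes: len(coords) ≤ 1 (points empty, max() raises ValueError)
-- and len(coords) > 27 (labels[i] with i ≥ 26 raises IndexError).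
def Pre_generate_v_dict (coords : List (Int × Int)) : Prop :=
  2 ≤ coords.length ∧ coords.length ≤ 27
instance (coords : List (Int × Int)) : Decidable (Pre_generate_v_dict coords) := by
  unfold Pre_generate_v_dict; infer_instance

def pvWitness_generate_v_dict : (List (Int × Int)) := [(0, 0), (3, 1), (1, 2)]

def Spec_generate_v_dict (coords : List (Int × Int)) (out : List (String × Int)) : Prop := out = generate_v_dict_alt coords
instance (coords : List (Int × Int)) (out : List (String × Int)) : Decidable (Spec_generate_v_dict coords out) := by unfold Spec_generate_v_dict; infer_instance

-- ===== CLAIM (what is proved, stated in full; the proofs are below) =====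
def Claim_equal_generate_v_dict : Prop := ∀ (coords : List (Int × Int)), Dom_generate_v_dict coords → Pre_generate_v_dict coords → Spec_generate_v_dict coords (generate_v_dict coords)

-- ===== LEMMAS AND PROOFS =====


set_option maxHeartbeats 1000000

-- pyLabels is strictly increasing, hence sorted and duplicate-free
theorem pv_labels_pairwise : pyLabels.Pairwise (· < ·) := by
  have hc : pyLabels.IsChain (· < ·) := by
    simp only [pyLabels, List.isChain_cons_cons, List.isChain_singleton, String.lt_iff_toList_lt]
    repeat' constructor
  exact hc.pairwise

theorem pv_labels_nodup : pyLabels.Nodup := pv_labels_pairwise.nodup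

-- max2? over a mapped list is the mapped max2? with composed keys
theorem pv_max2?_map {A B K1 K2 : Type} [LT K1] [DecidableLT K1] [LT K2] [DecidableLT K2]
    (g : A → B) (xs : List A) (k1 : B → K1) (k2 : B → K2) :
    PySem.List.max2? (xs.map g) k1 k2 =
      (PySem.List.max2? xs (fun a => k1 (g a)) (fun a => k2 (g a))).map g := by
  simp only [PySem.List.max2?]
  have aux : ∀ acc : Option A,
      (xs.map g).foldl
        (fun acc x => match acc with
          | none => some x
          | some m => if (decide (k1 m < k1 x) || (!decide (k1 x < k1 m) && decide (k2 m < k2 x))) = true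
              then some x else some m) (acc.map g)
      = (xs.foldl
        (fun acc x => match acc with
          | none => some x
          | some m => if (decide (k1 (g m) < k1 (g x)) || (!decide (k1 (g x) < k1 (g m)) && decide (k2 (g m) < k2 (g x)))) = true
              then some x else some m) acc).map g := by
    induction xs with
    | nil => intro acc; simp
    | cons x t ih =>
      intro acc
      simp only [List.map_cons, List.foldl_cons]
      rw [← ih]
      congr 1
      cases acc with
      | none => rfl
      | some m => simp only [Option.map_some]; split <;> rfl
  exact aux none

-- max2? only looks at the keys of list members
theorem pv_max2?_congr {A K1 K2 : Type} [LT K1] [DecidableLT K1] [LT K2] [DecidableLT K2]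
    (xs : List A) (k1 k1' : A → K1) (k2 k2' : A → K2)
    (h1 : ∀ x ∈ xs, k1 x = k1' x) (h2 : ∀ x ∈ xs, k2 x = k2' x) :
    PySem.List.max2? xs k1 k2 = PySem.List.max2? xs k1' k2' := by
  simp only [PySem.List.max2?]
  have aux : ∀ (l : List A), (∀ x ∈ l, k1 x = k1' x) → (∀ x ∈ l, k2 x = k2' x) →
      ∀ acc : Option A, (∀ a, acc = some a → k1 a = k1' a ∧ k2 a = k2' a) →
      l.foldl
        (fun acc x => match acc with
          | none => some x
          | some m => if (decide (k1 m < k1 x) || (!decide (k1 x < k1 m) && decide (k2 m < k2 x))) = true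
              then some x else some m) acc
      = l.foldl
        (fun acc x => match acc with
          | none => some x
          | some m => if (decide (k1' m < k1' x) || (!decide (k1' x < k1' m) && decide (k2' m < k2' x))) = true
              then some x else some m) acc := by
    intro l
    induction l with
    | nil => intro _ _ _ _; rfl
    | cons x t ih =>
      intro h1 h2 acc hacc
      have hx1 : k1 x = k1' x := h1 x (List.mem_cons_self ..)
      have hx2 : k2 x = k2' x := h2 x (List.mem_cons_self ..)
      have h1t := fun y hy => h1 y (List.mem_cons_of_mem _ hy)
      have h2t := fun y hy => h2 y (List.mem_cons_of_mem _ hy)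
      simp only [List.foldl_cons]
      cases acc with
      | none =>
        exact ih h1t h2t (some x) (by intro a ha; cases ha; exact ⟨hx1, hx2⟩)
      | some m =>
        obtain ⟨hm1, hm2⟩ := hacc m rfl
        have hcond : (decide (k1 m < k1 x) || (!decide (k1 x < k1 m) && decide (k2 m < k2 x)))
            = (decide (k1' m < k1' x) || (!decide (k1' x < k1' m) && decide (k2' m < k2' x))) := by
          rw [hm1, hm2, hx1, hx2]
        show List.foldl _ (if _ = true then some x else some m) t
            = List.foldl _ (if _ = true then some x else some m) t
        rw [hcond]
        by_cases hc : (decide (k1' m < k1' x) || (!decide (k1' x < k1' m) && decide (k2' m < k2' x))) = true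
        · rw [if_pos hc]
          exact ih h1t h2t (some x) (by intro a ha; cases ha; exact ⟨hx1, hx2⟩)
        · rw [if_neg hc]
          exact ih h1t h2t (some m) (by intro a ha; cases ha; exact ⟨hm1, hm2⟩)
  exact aux xs h1 h2 none (by intro a ha; cases ha)

-- max2? of a nonempty list is some member of it
theorem pv_max2?_cons {A K1 K2 : Type} [LT K1] [DecidableLT K1] [LT K2] [DecidableLT K2]
    (x : A) (t : List A) (k1 : A → K1) (k2 : A → K2) :
    ∃ m, PySem.List.max2? (x :: t) k1 k2 = some m ∧ m ∈ x :: t := by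
  simp only [PySem.List.max2?]
  have aux : ∀ (l : List A) (zs : List A) (a : A), a ∈ zs → (∀ y ∈ l, y ∈ zs) →
      ∃ m, l.foldl
        (fun acc x => match acc with
          | none => some x
          | some m => if (decide (k1 m < k1 x) || (!decide (k1 x < k1 m) && decide (k2 m < k2 x))) = true
              then some x else some m) (some a)
        = some m ∧ m ∈ zs := by
    intro l
    induction l with
    | nil => intro zs a ha _; exact ⟨a, rfl, ha⟩
    | cons y t ih =>
      intro zs a ha hl
      simp only [List.foldl_cons]
      split
      · exact ih zs y (hl y (List.mem_cons_self ..)) (fun z hz => hl z (List.mem_cons_of_mem _ hz))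
      · exact ih zs a ha (fun z hz => hl z (List.mem_cons_of_mem _ hz))
  simpa using aux t (x :: t) x (List.mem_cons_self ..) (fun z hz => List.mem_cons_of_mem _ hz)

-- [xs[j] for j in range(n)] = xs.take n  (n ≤ len(xs))
theorem pv_map_pyGetD_range_take {A : Type} (xs : List A) (n : Nat) (d : A) (h : n ≤ xs.length) :
    (PySem.List.pyRange 0 (n : Int) 1).map (fun j => PySem.List.pyGetD xs j d) = xs.take n := by
  apply List.ext_getElem
  · simp [PySem.List.length_pyRange_one, h]
  · intro i h1 h2
    simp only [List.getElem_map, PySem.List.getElem_pyRange_one, List.getElem_take]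
    have hi : i < n := by simpa [PySem.List.length_pyRange_one] using h1
    rw [show ((0 : Int) + (i : Nat)) = ((i : Nat) : Int) by omega, PySem.List.pyGetD_natCast]
    exact List.getD_eq_getElem xs d (by omega)

-- first find? by key in a nodup-keyed association list hits the indexed pair
theorem pv_find_by_index {V : Type} (l : List (String × V)) (j : Nat) (hj : j < l.length)
    (hnd : (l.map Prod.fst).Nodup) (k : String) (hk : l[j].1 = k) :
    l.find? (fun p => p.1 == k) = some l[j] := by
  induction l generalizing j with
  | nil => simp at hj
  | cons p t ih =>
    simp only [List.map_cons, List.nodup_cons] at hnd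
    cases j with
    | zero =>
      simp only [List.getElem_cons_zero] at hk ⊢
      rw [List.find?_cons_of_pos (p := fun q => q.1 == k) (a := p) (l := t) (by simp [hk])]
    | succ j =>
      have hj' : j < t.length := by simpa using hj
      simp only [List.getElem_cons_succ] at hk ⊢
      have hne : ¬ (p.1 == k) = true := by
        simp only [beq_iff_eq]
        intro h
        exact hnd.1 ((h.trans hk.symm) ▸ List.mem_map_of_mem (l := t) (f := Prod.fst) (List.getElem_mem hj'))
      rw [List.find?_cons_of_neg (p := fun q => q.1 == k) (a := p) (l := t) hne]
      exact ih j hj' hnd.2 hk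

-- first index of xs[s] in a nodup list is s
theorem pv_index?_getElem (l : List String) (hnd : l.Nodup) (s : Nat) (hs : s < l.length) :
    PySem.List.index? l l[s] = some s := by
  rw [PySem.List.index?_eq_some_iff]
  refine ⟨l.take s, l.drop (s + 1), ?_, by simp [Nat.le_of_lt hs], ?_⟩
  · conv_lhs => rw [← List.take_append_drop s l]
    rw [List.drop_eq_getElem_cons hs]
  · intro hmem
    obtain ⟨j, hj, hjl⟩ := List.getElem_of_mem hmem
    have hjs : j < s := (by simpa using hj : j < s ∧ j < l.length).1
    rw [List.getElem_take] at hjl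
    have := (List.Nodup.getElem_inj_iff hnd).mp hjl
    omega

-- ===== VERDICT =====
theorem generate_v_dict_spec : Claim_equal_generate_v_dict := by
  intro coords _hdom hpre
  obtain ⟨h2, h27⟩ := hpre
  unfold Spec_generate_v_dict generate_v_dict generate_v_dict_alt generate_dict
  simp only [PySem.List.slice_to_neg_one, PySem.List.len_eq]
  set pts := coords.dropLast with hpts
  have hnlen : pts.length = coords.length - 1 := by simp [hpts]
  set n : Nat := pts.length with hn
  have hn1 : 1 ≤ n := by omega
  have hn26 : n ≤ 26 := by omega
  have hlab : pyLabels.length = 26 := by decide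
  -- the points dict is the association list [(labels[j], pts[j]) | j < n]
  have hmapk : (PySem.List.enumerate pts).map (fun p => PySem.List.pyGetD pyLabels p.1 "")
      = pyLabels.take n := by
    rw [PySem.List.enumerate_eq_map_pyRange pts (0, 0), List.map_map, PySem.List.len_eq, ← hn]
    exact pv_map_pyGetD_range_take pyLabels n "" (by omega)
  have hndk : ((PySem.List.enumerate pts).map (fun p => PySem.List.pyGetD pyLabels p.1 "")).Nodup := by
    rw [hmapk]; exact pv_labels_nodup.sublist (List.take_sublist n pyLabels)
  have hitems : ((PySem.List.enumerate pts).foldl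
      (fun d p => d.insert (PySem.List.pyGetD pyLabels p.1 "") p.2) PySem.Dict.empty).items
      = (PySem.List.enumerate pts).map (fun p => (PySem.List.pyGetD pyLabels p.1 "", p.2)) := by
    rw [PySem.Dict.items_foldl_insert_fresh (PySem.List.enumerate pts)
      (fun p => PySem.List.pyGetD pyLabels p.1 "") (fun p => p.2) PySem.Dict.empty
      (by intro a _; rfl) hndk]
    rfl
  set dct := List.foldl (fun d p => d.insert (PySem.List.pyGetD pyLabels p.1 "") p.2)
      PySem.Dict.empty (PySem.List.enumerate pts) with hdct
  have hkeys : dct.keys = pyLabels.take n := by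
    show dct.items.map (fun x => x.1) = _
    rw [hitems, List.map_map]
    exact hmapk
  have hndtake : (pyLabels.take n).Nodup := pv_labels_nodup.sublist (List.take_sublist n pyLabels)
  have hlookup : ∀ i : Int, 0 ≤ i → i < (n : Int) →
      dct.getD (PySem.List.pyGetD pyLabels i "") (0, 0) = PySem.List.pyGetD pts i (0, 0) := by
    intro i h0 hi
    have hj : i.toNat < n := by omega
    have hLlen : ((PySem.List.enumerate pts).map
        (fun p => (PySem.List.pyGetD pyLabels p.1 "", p.2))).length = n := by
      simp [PySem.List.length_enumerate, ← hn]
    have hLnd : (((PySem.List.enumerate pts).map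
        (fun p => (PySem.List.pyGetD pyLabels p.1 "", p.2))).map Prod.fst).Nodup := by
      rw [List.map_map]; exact hndk
    have hkey_eq : ((PySem.List.enumerate pts).map
        (fun p => (PySem.List.pyGetD pyLabels p.1 "", p.2)))[i.toNat]'(by omega)
        = (PySem.List.pyGetD pyLabels i "", PySem.List.pyGetD pts i (0, 0)) := by
      simp only [List.getElem_map, PySem.List.getElem_enumerate]
      rw [PySem.List.pyGetD_eq_getElem pts (0, 0) h0 (by rw [← hn]; exact hi)]
      rw [show (0 : Int) + ↑i.toNat = i from by omega]
    simp only [PySem.Dict.getD, PySem.Dict.get?]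
    rw [hitems]
    rw [pv_find_by_index _ i.toNat (by omega) hLnd _ (by rw [hkey_eq])]
    simp only [hkey_eq, Option.map_some, Option.getD_some]
  -- A's max over dict keys is B's argmax over indices, relabelled
  have hkeys_map : dct.keys
      = (PySem.List.pyRange 0 (n : Int)).map (fun j => PySem.List.pyGetD pyLabels j "") := by
    rw [hkeys, pv_map_pyGetD_range_take pyLabels n "" (by omega)]
  have hmaxA : PySem.List.max2? dct.keys
      (fun k => (dct.getD k (0, 0)).1) (fun k => (dct.getD k (0, 0)).2)
      = (PySem.List.max2? (PySem.List.pyRange 0 (n : Int))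
          (fun i => (PySem.List.pyGetD pts i (0, 0)).1)
          (fun i => (PySem.List.pyGetD pts i (0, 0)).2)).map
        (fun j => PySem.List.pyGetD pyLabels j "") := by
    rw [hkeys_map, pv_max2?_map]
    congr 1
    apply pv_max2?_congr
    · intro x hx
      obtain ⟨hx0, hxn⟩ := PySem.List.mem_pyRange_one.mp hx
      rw [hlookup x hx0 hxn]
    · intro x hx
      obtain ⟨hx0, hxn⟩ := PySem.List.mem_pyRange_one.mp hx
      rw [hlookup x hx0 hxn]
  obtain ⟨sI, hmaxB, hsmem⟩ : ∃ m, PySem.List.max2? (PySem.List.pyRange 0 (n : Int))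
      (fun i => (PySem.List.pyGetD pts i (0, 0)).1)
      (fun i => (PySem.List.pyGetD pts i (0, 0)).2) = some m
      ∧ m ∈ PySem.List.pyRange 0 (n : Int) := by
    rw [PySem.List.pyRange_one_cons (by omega : (0:Int) < (n : Int))]
    exact pv_max2?_cons _ _ _ _
  obtain ⟨hs0, hsn⟩ := PySem.List.mem_pyRange_one.mp hsmem
  rw [hmaxA, hmaxB]
  simp only [Option.map_some, Option.getD_some]
  -- the sorted key list is the key list itself
  have hsorted : PySem.List.sorted dct.keys (fun x => x) = dct.keys := by
    apply PySem.List.sorted_eq_self_of_pairwise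
    rw [hkeys]
    exact ((pv_labels_pairwise.sublist (List.take_sublist n pyLabels)).imp (fun h => le_of_lt h))
  rw [hsorted, hkeys]
  -- the .index scan finds exactly sI
  have hsnat : sI.toNat < n := by omega
  have hgs : PySem.List.pyGetD pyLabels sI "" = (pyLabels.take n)[sI.toNat]'(by simp [hlab]; omega) := by
    rw [List.getElem_take, PySem.List.pyGetD_eq_getElem pyLabels "" hs0 (by rw [hlab]; omega)]
  have hidx : PySem.List.index? (pyLabels.take n) (PySem.List.pyGetD pyLabels sI "")
      = some sI.toNat := by
    rw [hgs]
    exact pv_index?_getElem _ hndtake sI.toNat (by simp [hlab]; omega)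
  rw [hidx]
  simp only [Option.getD_some]
  rw [PySem.List.slice_from_natCast, PySem.List.slice_to_natCast]
  -- both final loops insert the same key/value sequence
  set NO := (pyLabels.take n).drop sI.toNat ++ (pyLabels.take n).take sI.toNat with hNO
  have hNOlen : NO.length = n := by
    simp only [hNO, List.length_append, List.length_drop, List.length_take, hlab]
    omega
  rw [PySem.List.enumerate_eq_map_pyRange NO "", PySem.List.len_eq, hNOlen, List.foldl_map]
  refine congrArg _ (PySem.List.foldl_congr_mem _ _ _ _ ?_)
  intro acc x hx
  obtain ⟨hx0, hxn⟩ := PySem.List.mem_pyRange_one.mp hx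
  have hkeyeq : PySem.List.pyGetD NO x ""
      = PySem.List.pyGetD pyLabels (PySem.Int.mod (sI + x) (n : Int)) "" := by
    have hmod : PySem.Int.mod (sI + x) (n : Int) = (sI + x) % (n : Int) :=
      PySem.Int.mod_eq_emod_of_pos (by omega)
    have hdl : ((pyLabels.take n).drop sI.toNat).length = n - sI.toNat := by
      simp [hlab]; omega
    have hxx : x = ((x.toNat : Nat) : Int) := by omega
    by_cases hcase : sI + x < (n : Int)
    · have hem : (sI + x) % (n : Int) = sI + x := Int.emod_eq_of_lt (by omega) hcase
      rw [hmod, hem]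
      rw [hxx, PySem.List.pyGetD_natCast]
      rw [show sI + ((x.toNat : Nat) : Int) = (((sI.toNat + x.toNat) : Nat) : Int) from by omega,
        PySem.List.pyGetD_natCast]
      rw [List.getD_eq_getElem?_getD, List.getD_eq_getElem?_getD, hNO]
      rw [List.getElem?_append_left (by rw [hdl]; omega)]
      rw [List.getElem?_drop]
      rw [List.getElem?_take_of_lt (by omega)]
    · have hem : (sI + x) % (n : Int) = sI + x - n := by
        rw [← Int.sub_emod_right (sI + x) (n : Int)]
        exact Int.emod_eq_of_lt (by omega) (by omega)
      rw [hmod, hem]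
      rw [hxx, PySem.List.pyGetD_natCast]
      rw [show sI + ((x.toNat : Nat) : Int) - n = (((sI.toNat + x.toNat - n) : Nat) : Int) from by omega,
        PySem.List.pyGetD_natCast]
      rw [List.getD_eq_getElem?_getD, List.getD_eq_getElem?_getD, hNO]
      rw [List.getElem?_append_right (by rw [hdl]; omega)]
      rw [hdl]
      rw [show x.toNat - (n - sI.toNat) = sI.toNat + x.toNat - n from by omega]
      rw [List.getElem?_take_of_lt (by omega)]
      rw [List.getElem?_take_of_lt (by omega)]
  simp only [hkeyeq]
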